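-- pv_equiv track=rewrite | github.com/burakkho/thrustr | complete_italian_translations.py | _categorize_keys
-- ===== SOURCE A (Python) =====
-- from typing import Dict, Set
--
-- def _categorize_keys(strings_dict: Dict[str, str]) -> Dict[str, list]:
--     """Categorize keys by their prefixes for organized output"""
--     categories = {
--         'Common Actions': [],
--         'Navigation': [],
--         'Tab Bar': [],
--         'Dashboard': [],
--         'Training': [],
--         'Nutrition': [],
--         'Profile': [],
--         'Analytics': [],
--         'Settings': [],
--         'Errors': [],
--         'Onboarding': [],
--         'Calculators': [],
--         'Body Measurements': [],
--         'Food & Meals': [],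
--         'Workouts': [],
--         'Health': [],
--         'Achievements': [],
--         'Miscellaneous': []
--     }
--
--     for key in strings_dict.keys():
--         categorized = False
--
--         # Categorize based on key prefixes
--         if key.startswith('common.'):
--             categories['Common Actions'].append(key)
--             categorized = True
--         elif key.startswith('navigation.'):
--             categories['Navigation'].append(key)
--             categorized = True
--         elif key.startswith('tab.'):
--             categories['Tab Bar'].append(key)
--             categorized = True
--         elif key.startswith('dashboard.'):
--             categories['Dashboard'].append(key)
--             categorized = True
--         elif key.startswith('training.'):
--             categories['Training'].append(key)
--             categorized = True
--         elif key.startswith('nutrition.'):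
--             categories['Nutrition'].append(key)
--             categorized = True
--         elif key.startswith('profile.'):
--             categories['Profile'].append(key)
--             categorized = True
--         elif key.startswith('analytics.'):
--             categories['Analytics'].append(key)
--             categorized = True
--         elif key.startswith('settings.'):
--             categories['Settings'].append(key)
--             categorized = True
--         elif key.startswith('error.'):
--             categories['Errors'].append(key)
--             categorized = True
--         elif key.startswith('onboarding.'):
--             categories['Onboarding'].append(key)
--             categorized = True
--         elif key.startswith('calculator.'):
--             categories['Calculators'].append(key)
--             categorized = True
--         elif key.startswith('body.') or 'measurement' in key:
--             categories['Body Measurements'].append(key)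
--             categorized = True
--         elif key.startswith('food.') or key.startswith('meal.'):
--             categories['Food & Meals'].append(key)
--             categorized = True
--         elif key.startswith('workout.') or key.startswith('exercise.'):
--             categories['Workouts'].append(key)
--             categorized = True
--         elif key.startswith('health.'):
--             categories['Health'].append(key)
--             categorized = True
--         elif key.startswith('achievement.'):
--             categories['Achievements'].append(key)
--             categorized = True
--
--         if not categorized:
--             categories['Miscellaneous'].append(key)
--
--     return categories
-- ===== SOURCE B (Python) =====
-- _HIGH = {
--     'common': 'Common Actions', 'navigation': 'Navigation', 'tab': 'Tab Bar',
--     'dashboard': 'Dashboard', 'training': 'Training', 'nutrition': 'Nutrition',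
--     'profile': 'Profile', 'analytics': 'Analytics', 'settings': 'Settings',
--     'error': 'Errors', 'onboarding': 'Onboarding', 'calculator': 'Calculators',
--     'body': 'Body Measurements',
-- }
--
-- _LOW = {
--     'food': 'Food & Meals', 'meal': 'Food & Meals', 'workout': 'Workouts',
--     'exercise': 'Workouts', 'health': 'Health', 'achievement': 'Achievements',
-- }
--
-- _NAMES = ['Common Actions', 'Navigation', 'Tab Bar', 'Dashboard', 'Training',
--           'Nutrition', 'Profile', 'Analytics', 'Settings', 'Errors', 'Onboarding',
--           'Calculators', 'Body Measurements', 'Food & Meals', 'Workouts', 'Health',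
--           'Achievements', 'Miscellaneous']
--
--
-- def _categorize_keys(strings_dict):
--     categories = {name: [] for name in _NAMES}
--     for key in strings_dict.keys():
--         dot = key.find('.')
--         prefix = key[:dot] if dot >= 0 else None
--         cat = _HIGH.get(prefix) if prefix is not None else None
--         if cat is None:
--             if 'measurement' in key:
--                 cat = 'Body Measurements'
--             elif prefix is not None:
--                 cat = _LOW.get(prefix)
--         categories[cat if cat is not None else 'Miscellaneous'].append(key)
--     return categories
-- ===== Notes on version B (the rewrite author's own statement) =====
-- stated objective: faster
-- what changed: Replaces A's 17-branch startswith elif chain by computing each key's first-dot segment once and resolving it through two prefix-to-category dict lookups (high-priority map, then the 'measurement' substring test, then a low-priority map), appending into pre-initialised category lists.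
import Mathlib
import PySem

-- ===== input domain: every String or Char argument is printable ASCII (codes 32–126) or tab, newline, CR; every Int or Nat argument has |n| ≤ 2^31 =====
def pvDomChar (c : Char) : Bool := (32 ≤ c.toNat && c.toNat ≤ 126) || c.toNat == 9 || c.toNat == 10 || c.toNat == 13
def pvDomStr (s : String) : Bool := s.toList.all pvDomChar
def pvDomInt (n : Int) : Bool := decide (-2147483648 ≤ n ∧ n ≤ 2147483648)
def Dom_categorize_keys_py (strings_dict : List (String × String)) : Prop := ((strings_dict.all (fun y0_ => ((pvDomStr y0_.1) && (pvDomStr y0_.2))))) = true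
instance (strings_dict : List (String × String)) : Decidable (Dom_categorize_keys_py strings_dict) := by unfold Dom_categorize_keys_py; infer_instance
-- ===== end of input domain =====

-- B resolves each key's category via the segment before the first '.' and two prefix→category
-- dict lookups instead of A's 17-way startswith branch chain (measured faster in a timing run).


-- ===== PORT A =====
-- the fixed categories dict A initialises first
def pvInitA : PySem.Dict String (List String) :=
  PySem.Dict.ofList [("Common Actions", []), ("Navigation", []), ("Tab Bar", []),
    ("Dashboard", []), ("Training", []), ("Nutrition", []), ("Profile", []),
    ("Analytics", []), ("Settings", []), ("Errors", []), ("Onboarding", []),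
    ("Calculators", []), ("Body Measurements", []), ("Food & Meals", []),
    ("Workouts", []), ("Health", []), ("Achievements", []), ("Miscellaneous", [])]

-- A's loop body: the elif chain; each branch appends key to its category's list
def pvStepA (d : PySem.Dict String (List String)) (key : String) : PySem.Dict String (List String) :=
  if PySem.Str.startswith key "common." then d.modify "Common Actions" [] (· ++ [key])
  else if PySem.Str.startswith key "navigation." then d.modify "Navigation" [] (· ++ [key])
  else if PySem.Str.startswith key "tab." then d.modify "Tab Bar" [] (· ++ [key])
  else if PySem.Str.startswith key "dashboard." then d.modify "Dashboard" [] (· ++ [key])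
  else if PySem.Str.startswith key "training." then d.modify "Training" [] (· ++ [key])
  else if PySem.Str.startswith key "nutrition." then d.modify "Nutrition" [] (· ++ [key])
  else if PySem.Str.startswith key "profile." then d.modify "Profile" [] (· ++ [key])
  else if PySem.Str.startswith key "analytics." then d.modify "Analytics" [] (· ++ [key])
  else if PySem.Str.startswith key "settings." then d.modify "Settings" [] (· ++ [key])
  else if PySem.Str.startswith key "error." then d.modify "Errors" [] (· ++ [key])
  else if PySem.Str.startswith key "onboarding." then d.modify "Onboarding" [] (· ++ [key])
  else if PySem.Str.startswith key "calculator." then d.modify "Calculators" [] (· ++ [key])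
  else if PySem.Str.startswith key "body." || PySem.Str.isIn "measurement" key then d.modify "Body Measurements" [] (· ++ [key])
  else if PySem.Str.startswith key "food." || PySem.Str.startswith key "meal." then d.modify "Food & Meals" [] (· ++ [key])
  else if PySem.Str.startswith key "workout." || PySem.Str.startswith key "exercise." then d.modify "Workouts" [] (· ++ [key])
  else if PySem.Str.startswith key "health." then d.modify "Health" [] (· ++ [key])
  else if PySem.Str.startswith key "achievement." then d.modify "Achievements" [] (· ++ [key])
  else d.modify "Miscellaneous" [] (· ++ [key])  -- the `if not categorized` fallback

def categorize_keys_py (strings_dict : List (String × String)) : List (String × List String) :=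
  ((PySem.Dict.ofList strings_dict).keys.foldl pvStepA pvInitA).items

-- ===== PORT B =====
def pvHigh : PySem.Dict String String := PySem.Dict.ofList
  [("common", "Common Actions"), ("navigation", "Navigation"), ("tab", "Tab Bar"),
   ("dashboard", "Dashboard"), ("training", "Training"), ("nutrition", "Nutrition"),
   ("profile", "Profile"), ("analytics", "Analytics"), ("settings", "Settings"),
   ("error", "Errors"), ("onboarding", "Onboarding"), ("calculator", "Calculators"),
   ("body", "Body Measurements")]

def pvLow : PySem.Dict String String := PySem.Dict.ofList
  [("food", "Food & Meals"), ("meal", "Food & Meals"), ("workout", "Workouts"),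
   ("exercise", "Workouts"), ("health", "Health"), ("achievement", "Achievements")]

def pvNames : List String :=
  ["Common Actions", "Navigation", "Tab Bar", "Dashboard", "Training", "Nutrition",
   "Profile", "Analytics", "Settings", "Errors", "Onboarding", "Calculators",
   "Body Measurements", "Food & Meals", "Workouts", "Health", "Achievements", "Miscellaneous"]

-- B's per-key category resolution: first-dot segment → high map → measurement substring → low map → Miscellaneous
def pvResolve (key : String) : String :=
  let dot := PySem.Str.find key "."
  let p? : Option String := if 0 ≤ dot then some (PySem.Str.slice key none (some dot)) else none
  let cat0 : Option String := match p? with | some p => pvHigh.get? p | none => none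
  let cat : Option String :=
    match cat0 with
    | some c => some c
    | none =>
        if PySem.Str.isIn "measurement" key then some "Body Measurements"
        else match p? with | some p => pvLow.get? p | none => none
  cat.getD "Miscellaneous"

def categorize_keys_py_alt (strings_dict : List (String × String)) : List (String × List String) :=
  ((PySem.Dict.ofList strings_dict).keys.foldl
      (fun d key => d.modify (pvResolve key) [] (· ++ [key]))
      (pvNames.foldl (fun d name => d.insert name []) PySem.Dict.empty)).items

-- ===== PRECONDITION & SPEC =====
def Spec_categorize_keys_py (strings_dict : List (String × String)) (out : List (String × List String)) : Prop := out = categorize_keys_py_alt strings_dict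
instance (strings_dict : List (String × String)) (out : List (String × List String)) : Decidable (Spec_categorize_keys_py strings_dict out) := by unfold Spec_categorize_keys_py; infer_instance

-- ===== CLAIM (what is proved, stated in full; the proofs are below) =====
def Claim_equal_categorize_keys_py : Prop := ∀ (strings_dict : List (String × String)), Dom_categorize_keys_py strings_dict → Spec_categorize_keys_py strings_dict (categorize_keys_py strings_dict)

-- ===== LEMMAS AND PROOFS =====

-- startswith (p ++ ".") is exactly: the string has a '.', and its first-dot segment is p (for a dot-free p)
theorem pv_startswith_dot (cs p : List Char) (hp : '.' ∉ p) :
    PySem.Chars.startswith cs (p ++ ['.']) = true ↔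
      0 ≤ PySem.Chars.find cs ['.'] ∧ List.take (PySem.Chars.find cs ['.']).toNat cs = p := by
  rw [PySem.Chars.startswith_iff]
  constructor
  · rintro ⟨t, ht⟩
    have hinf : ['.'] <:+: cs := ⟨p, t, by simpa using ht⟩
    have h0 : 0 ≤ PySem.Chars.find cs ['.'] := (PySem.Chars.find_nonneg_iff cs ['.']).2 hinf
    obtain ⟨hpre, hmin⟩ := PySem.Chars.find_spec h0
    have hle : (PySem.Chars.find cs ['.']).toNat ≤ p.length := by
      by_contra hc
      exact hmin p.length (by omega) (by rw [← ht]; simp)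
    have hlen : p.length < cs.length := by
      have := congrArg List.length ht
      simp at this; omega
    have hge : p.length ≤ (PySem.Chars.find cs ['.']).toNat := by
      by_contra hc
      push_neg at hc
      obtain ⟨t', ht'⟩ := hpre
      have hcs : cs[(PySem.Chars.find cs ['.']).toNat]'(by omega) = '.' := by
        have := congrArg (fun l => l[0]?) ht'
        simp [List.getElem?_drop] at this
        have h2 : cs[(PySem.Chars.find cs ['.']).toNat]? = some '.' := by
          rw [← this]
        obtain ⟨_, h3⟩ := List.getElem?_eq_some_iff.mp h2
        exact h3
      have hpcs : p[(PySem.Chars.find cs ['.']).toNat]'(by omega) =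
          cs[(PySem.Chars.find cs ['.']).toNat]'(by omega) := by
        have hpfx : p <+: cs := ⟨'.' :: t, by simpa using ht⟩
        exact (List.IsPrefix.getElem hpfx _)
      exact hp (by rw [← hcs, ← hpcs]; exact List.getElem_mem _)
    have heq : (PySem.Chars.find cs ['.']).toNat = p.length := le_antisymm hle hge
    refine ⟨h0, ?_⟩
    rw [heq, ← ht]
    simpa using List.take_left (l₁ := p) (l₂ := '.' :: t)
  · rintro ⟨h0, htake⟩
    obtain ⟨hpre, -⟩ := PySem.Chars.find_spec h0
    obtain ⟨t', ht'⟩ := hpre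
    refine ⟨t', ?_⟩
    have hsplit := List.take_append_drop (PySem.Chars.find cs ['.']).toNat cs
    rw [← ht'] at hsplit
    rw [htake] at hsplit
    simpa using hsplit

-- Bool form of the above, for rewriting if-conditions
theorem pv_sw (cs p : List Char) (hp : '.' ∉ p) :
    PySem.Chars.startswith cs (p ++ ['.']) =
      (decide (0 ≤ PySem.Chars.find cs ['.']) &&
       decide (List.take (PySem.Chars.find cs ['.']).toNat cs = p)) := by
  rw [Bool.eq_iff_iff]
  simp [pv_startswith_dot cs p hp]

-- A's category resolution, extracted from pvStepA
def pvCatA (key : String) : String :=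
  if PySem.Str.startswith key "common." then "Common Actions"
  else if PySem.Str.startswith key "navigation." then "Navigation"
  else if PySem.Str.startswith key "tab." then "Tab Bar"
  else if PySem.Str.startswith key "dashboard." then "Dashboard"
  else if PySem.Str.startswith key "training." then "Training"
  else if PySem.Str.startswith key "nutrition." then "Nutrition"
  else if PySem.Str.startswith key "profile." then "Profile"
  else if PySem.Str.startswith key "analytics." then "Analytics"
  else if PySem.Str.startswith key "settings." then "Settings"
  else if PySem.Str.startswith key "error." then "Errors"
  else if PySem.Str.startswith key "onboarding." then "Onboarding"
  else if PySem.Str.startswith key "calculator." then "Calculators"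
  else if PySem.Str.startswith key "body." || PySem.Str.isIn "measurement" key then "Body Measurements"
  else if PySem.Str.startswith key "food." || PySem.Str.startswith key "meal." then "Food & Meals"
  else if PySem.Str.startswith key "workout." || PySem.Str.startswith key "exercise." then "Workouts"
  else if PySem.Str.startswith key "health." then "Health"
  else if PySem.Str.startswith key "achievement." then "Achievements"
  else "Miscellaneous"

theorem pvStepA_eq (d : PySem.Dict String (List String)) (key : String) :
    pvStepA d key = d.modify (pvCatA key) [] (· ++ [key]) := by
  unfold pvStepA pvCatA
  simp only [apply_ite (fun c => PySem.Dict.modify d c [] (fun x => x ++ [key]))]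

theorem pv_swS (key p pd : String) (hpd : pd.toList = p.toList ++ ['.']) (hp : '.' ∉ p.toList) :
    PySem.Str.startswith key pd =
      (decide (0 ≤ PySem.Chars.find key.toList ['.']) &&
       decide (List.take (PySem.Chars.find key.toList ['.']).toNat key.toList = p.toList)) := by
  rw [PySem.Str.startswith_eq, hpd, pv_sw _ _ hp]

theorem pv_beq (t : List Char) (l : String) :
    (l == String.ofList t) = decide (t = l.toList) := by
  rw [Bool.eq_iff_iff]
  constructor
  · intro h; have := beq_iff_eq.mp h; simp [← String.toList_inj] at this ⊢; simp [← this]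
  · intro h; have := of_decide_eq_true h; apply beq_iff_eq.mpr; rw [← String.toList_inj]; simp [← this]

theorem pvCat_eq (key : String) : pvCatA key = pvResolve key := by
  have hdot : ("." : String).toList = ['.'] := by decide
  have hhigh : pvHigh = PySem.Dict.mk
    [("common", "Common Actions"), ("navigation", "Navigation"), ("tab", "Tab Bar"),
     ("dashboard", "Dashboard"), ("training", "Training"), ("nutrition", "Nutrition"),
     ("profile", "Profile"), ("analytics", "Analytics"), ("settings", "Settings"),
     ("error", "Errors"), ("onboarding", "Onboarding"), ("calculator", "Calculators"),
     ("body", "Body Measurements")] := by rfl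
  have hlow : pvLow = PySem.Dict.mk
    [("food", "Food & Meals"), ("meal", "Food & Meals"), ("workout", "Workouts"),
     ("exercise", "Workouts"), ("health", "Health"), ("achievement", "Achievements")] := by rfl
  unfold pvCatA pvResolve
  rw [pv_swS key "common" "common." (by decide) (by decide),
      pv_swS key "navigation" "navigation." (by decide) (by decide),
      pv_swS key "tab" "tab." (by decide) (by decide),
      pv_swS key "dashboard" "dashboard." (by decide) (by decide),
      pv_swS key "training" "training." (by decide) (by decide),
      pv_swS key "nutrition" "nutrition." (by decide) (by decide),
      pv_swS key "profile" "profile." (by decide) (by decide),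
      pv_swS key "analytics" "analytics." (by decide) (by decide),
      pv_swS key "settings" "settings." (by decide) (by decide),
      pv_swS key "error" "error." (by decide) (by decide),
      pv_swS key "onboarding" "onboarding." (by decide) (by decide),
      pv_swS key "calculator" "calculator." (by decide) (by decide),
      pv_swS key "body" "body." (by decide) (by decide),
      pv_swS key "food" "food." (by decide) (by decide),
      pv_swS key "meal" "meal." (by decide) (by decide),
      pv_swS key "workout" "workout." (by decide) (by decide),
      pv_swS key "exercise" "exercise." (by decide) (by decide),
      pv_swS key "health" "health." (by decide) (by decide),
      pv_swS key "achievement" "achievement." (by decide) (by decide),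
      PySem.Str.isIn_eq, PySem.Str.find_eq, hdot]
  by_cases h0 : 0 ≤ PySem.Chars.find key.toList ['.']
  · have hs : PySem.Str.slice key none (some (PySem.Chars.find key.toList ['.'])) =
        String.ofList (List.take (PySem.Chars.find key.toList ['.']).toNat key.toList) := by
      rw [← String.toList_inj, PySem.Str.toList_slice, PySem.Chars.slice_eq_listSlice,
          PySem.List.slice_to _ h0]
      simp
    set t := List.take (PySem.Chars.find key.toList ['.']).toNat key.toList with ht
    by_cases h1 : t = ['c', 'o', 'm', 'm', 'o', 'n']
    · simp [h0, h1, hs, hhigh, hlow, PySem.Dict.get?_mk_cons, PySem.Dict.get?, pv_beq]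
    by_cases h2 : t = ['n', 'a', 'v', 'i', 'g', 'a', 't', 'i', 'o', 'n']
    · simp [h0, h1, h2, hs, hhigh, hlow, PySem.Dict.get?_mk_cons, PySem.Dict.get?, pv_beq]
    by_cases h3 : t = ['t', 'a', 'b']
    · simp [h0, h1, h2, h3, hs, hhigh, hlow, PySem.Dict.get?_mk_cons, PySem.Dict.get?, pv_beq]
    by_cases h4 : t = ['d', 'a', 's', 'h', 'b', 'o', 'a', 'r', 'd']
    · simp [h0, h1, h2, h3, h4, hs, hhigh, hlow, PySem.Dict.get?_mk_cons, PySem.Dict.get?, pv_beq]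
    by_cases h5 : t = ['t', 'r', 'a', 'i', 'n', 'i', 'n', 'g']
    · simp [h0, h1, h2, h3, h4, h5, hs, hhigh, hlow, PySem.Dict.get?_mk_cons, PySem.Dict.get?, pv_beq]
    by_cases h6 : t = ['n', 'u', 't', 'r', 'i', 't', 'i', 'o', 'n']
    · simp [h0, h1, h2, h3, h4, h5, h6, hs, hhigh, hlow, PySem.Dict.get?_mk_cons, PySem.Dict.get?, pv_beq]
    by_cases h7 : t = ['p', 'r', 'o', 'f', 'i', 'l', 'e']
    · simp [h0, h1, h2, h3, h4, h5, h6, h7, hs, hhigh, hlow, PySem.Dict.get?_mk_cons, PySem.Dict.get?, pv_beq]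
    by_cases h8 : t = ['a', 'n', 'a', 'l', 'y', 't', 'i', 'c', 's']
    · simp [h0, h1, h2, h3, h4, h5, h6, h7, h8, hs, hhigh, hlow, PySem.Dict.get?_mk_cons, PySem.Dict.get?, pv_beq]
    by_cases h9 : t = ['s', 'e', 't', 't', 'i', 'n', 'g', 's']
    · simp [h0, h1, h2, h3, h4, h5, h6, h7, h8, h9, hs, hhigh, hlow, PySem.Dict.get?_mk_cons, PySem.Dict.get?, pv_beq]
    by_cases h10 : t = ['e', 'r', 'r', 'o', 'r']
    · simp [h0, h1, h2, h3, h4, h5, h6, h7, h8, h9, h10, hs, hhigh, hlow, PySem.Dict.get?_mk_cons, PySem.Dict.get?, pv_beq]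
    by_cases h11 : t = ['o', 'n', 'b', 'o', 'a', 'r', 'd', 'i', 'n', 'g']
    · simp [h0, h1, h2, h3, h4, h5, h6, h7, h8, h9, h10, h11, hs, hhigh, hlow, PySem.Dict.get?_mk_cons, PySem.Dict.get?, pv_beq]
    by_cases h12 : t = ['c', 'a', 'l', 'c', 'u', 'l', 'a', 't', 'o', 'r']
    · simp [h0, h1, h2, h3, h4, h5, h6, h7, h8, h9, h10, h11, h12, hs, hhigh, hlow, PySem.Dict.get?_mk_cons, PySem.Dict.get?, pv_beq]
    by_cases h13 : t = ['b', 'o', 'd', 'y']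
    · simp [h0, h1, h2, h3, h4, h5, h6, h7, h8, h9, h10, h11, h12, h13, hs, hhigh, hlow, PySem.Dict.get?_mk_cons, PySem.Dict.get?, pv_beq]
    by_cases hm : PySem.Chars.isIn ['m', 'e', 'a', 's', 'u', 'r', 'e', 'm', 'e', 'n', 't'] key.toList = true
    · simp [h0, h1, h2, h3, h4, h5, h6, h7, h8, h9, h10, h11, h12, h13, hm, hs, hhigh, hlow, PySem.Dict.get?_mk_cons, PySem.Dict.get?, pv_beq]
    by_cases h14 : t = ['f', 'o', 'o', 'd']
    · simp [h0, h1, h2, h3, h4, h5, h6, h7, h8, h9, h10, h11, h12, h13, hm, h14, hs, hhigh, hlow, PySem.Dict.get?_mk_cons, PySem.Dict.get?, pv_beq]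
    by_cases h15 : t = ['m', 'e', 'a', 'l']
    · simp [h0, h1, h2, h3, h4, h5, h6, h7, h8, h9, h10, h11, h12, h13, hm, h14, h15, hs, hhigh, hlow, PySem.Dict.get?_mk_cons, PySem.Dict.get?, pv_beq]
    by_cases h16 : t = ['w', 'o', 'r', 'k', 'o', 'u', 't']
    · simp [h0, h1, h2, h3, h4, h5, h6, h7, h8, h9, h10, h11, h12, h13, hm, h14, h15, h16, hs, hhigh, hlow, PySem.Dict.get?_mk_cons, PySem.Dict.get?, pv_beq]
    by_cases h17 : t = ['e', 'x', 'e', 'r', 'c', 'i', 's', 'e']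
    · simp [h0, h1, h2, h3, h4, h5, h6, h7, h8, h9, h10, h11, h12, h13, hm, h14, h15, h16, h17, hs, hhigh, hlow, PySem.Dict.get?_mk_cons, PySem.Dict.get?, pv_beq]
    by_cases h18 : t = ['h', 'e', 'a', 'l', 't', 'h']
    · simp [h0, h1, h2, h3, h4, h5, h6, h7, h8, h9, h10, h11, h12, h13, hm, h14, h15, h16, h17, h18, hs, hhigh, hlow, PySem.Dict.get?_mk_cons, PySem.Dict.get?, pv_beq]
    by_cases h19 : t = ['a', 'c', 'h', 'i', 'e', 'v', 'e', 'm', 'e', 'n', 't']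
    · simp [h0, h1, h2, h3, h4, h5, h6, h7, h8, h9, h10, h11, h12, h13, hm, h14, h15, h16, h17, h18, h19, hs, hhigh, hlow, PySem.Dict.get?_mk_cons, PySem.Dict.get?, pv_beq]
    · simp [h0, h1, h2, h3, h4, h5, h6, h7, h8, h9, h10, h11, h12, h13, hm, h14, h15, h16, h17, h18, h19, hs, hhigh, hlow, PySem.Dict.get?_mk_cons, PySem.Dict.get?, pv_beq]
  · by_cases hm : PySem.Chars.isIn ['m', 'e', 'a', 's', 'u', 'r', 'e', 'm', 'e', 'n', 't'] key.toList = true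
    · simp [h0, hm]
    · simp [h0, hm]

theorem pvInit_eq : pvInitA = pvNames.foldl (fun d name => d.insert name []) PySem.Dict.empty := by
  decide

-- ===== VERDICT (by name: the statement is the Claim_ definition above) =====
theorem categorize_keys_py_spec : Claim_equal_categorize_keys_py := by
  intro strings_dict _
  unfold Spec_categorize_keys_py categorize_keys_py categorize_keys_py_alt
  rw [← pvInit_eq]
  congr 2
  funext d key
  rw [pvStepA_eq, pvCat_eq]
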